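-- pv_equiv track=rewrite | github.com/PaddlePaddle/PaddleRobotics | HRI/TFVF_HRI/perception/utterance/tokenizer.py | _split_punc_and_symbols
-- ===== SOURCE A (Python) =====
-- import unicodedata
--
-- def _split_punc_and_symbols(tokens):
--     new_tokens = []
--     for token in tokens:
--         chars = list(token)
--         idx, split = 0, []
--         while idx < len(chars):
--             cat = unicodedata.category(chars[idx])
--             if cat.startswith('P') or cat.startswith('S'):
--                 if len(split) > 0:
--                     new_tokens.append(''.join(split))
--                     split = []
--                 new_tokens.append(chars[idx])
--             else:
--                 split.append(chars[idx])
--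
--             idx += 1
--
--         if len(split) > 0:
--             new_tokens.append(''.join(split))
--
--     return new_tokens
-- ===== SOURCE B (Python) =====
-- import unicodedata
--
--
-- def _split_punc_and_symbols(tokens):
--     out = []
--     for token in tokens:
--         start = 0
--         for i, ch in enumerate(token):
--             if unicodedata.category(ch)[0] in 'PS':
--                 if start < i:
--                     out.append(token[start:i])
--                 out.append(ch)
--                 start = i + 1
--         if start < len(token):
--             out.append(token[start:])
--     return out
-- ===== Notes on version B (the rewrite author's own statement) =====
-- stated objective: alternative
-- what changed: Replaced A's index while-loop that accumulates characters into a split buffer and joins them with an enumerate pass that tracks the current segment's start index and appends token slices token[start:i] directly.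
import Mathlib
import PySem

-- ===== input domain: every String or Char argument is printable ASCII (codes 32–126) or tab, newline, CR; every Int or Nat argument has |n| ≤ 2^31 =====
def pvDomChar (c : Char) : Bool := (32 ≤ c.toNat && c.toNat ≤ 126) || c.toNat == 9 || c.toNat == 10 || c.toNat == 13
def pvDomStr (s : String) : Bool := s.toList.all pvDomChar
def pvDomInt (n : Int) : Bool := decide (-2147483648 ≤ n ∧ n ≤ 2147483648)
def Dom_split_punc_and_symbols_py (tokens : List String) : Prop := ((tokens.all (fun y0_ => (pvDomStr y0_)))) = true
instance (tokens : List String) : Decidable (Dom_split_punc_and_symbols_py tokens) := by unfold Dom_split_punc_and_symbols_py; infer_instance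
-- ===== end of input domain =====

-- B replaces A's char-accumulator while-loop by an enumerate pass that tracks a segment
-- start index and emits slices of the token (objective: alternative decomposition, same cost).


-- ===== PORT A =====
-- unicodedata.category(c) starts with 'P' or 'S': on the printable-ASCII domain these are
-- exactly the four ranges below (checked against CPython); exact on Dom.
def pvIsPS (c : Char) : Bool :=
  (33 ≤ c.toNat && c.toNat ≤ 47) || (58 ≤ c.toNat && c.toNat ≤ 64) ||
  (91 ≤ c.toNat && c.toNat ≤ 96) || (123 ≤ c.toNat && c.toNat ≤ 126)

-- A's while-loop over chars, state = (new_tokens, split accumulator); ''.join(split) = String.ofList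
def pvA_token (acc : List String) (cs : List Char) (split : List Char) : List String :=
  match cs with
  | [] => if split.length > 0 then acc ++ [String.ofList split] else acc
  | c :: rest =>
    if pvIsPS c then
      pvA_token ((if split.length > 0 then acc ++ [String.ofList split] else acc) ++ [String.ofList [c]]) rest []
    else
      pvA_token acc rest (split ++ [c])

def split_punc_and_symbols_py (tokens : List String) : List String :=
  tokens.foldl (fun acc t => pvA_token acc t.toList []) []

-- ===== PORT B =====
-- B's enumerate loop over token t, state = (start index, out); token[start:i] with
-- 0 ≤ start ≤ i ≤ len(t) is exactly (t.drop start).take (i - start), token[start:] = t.drop start.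
def pvB_go (t : List Char) (cs : List Char) (i start : Nat) (out : List String) : List String :=
  match cs with
  | [] => if start < t.length then out ++ [String.ofList (t.drop start)] else out
  | c :: rest =>
    if pvIsPS c then
      pvB_go t rest (i + 1) (i + 1)
        ((if start < i then out ++ [String.ofList ((t.drop start).take (i - start))] else out) ++ [String.ofList [c]])
    else
      pvB_go t rest (i + 1) start out

def split_punc_and_symbols_py_alt (tokens : List String) : List String :=
  tokens.foldl (fun out t => pvB_go t.toList t.toList 0 0 out) []

-- ===== PRECONDITION & SPEC =====
def Spec_split_punc_and_symbols_py (tokens : List String) (out : List String) : Prop := out = split_punc_and_symbols_py_alt tokens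
instance (tokens : List String) (out : List String) : Decidable (Spec_split_punc_and_symbols_py tokens out) := by unfold Spec_split_punc_and_symbols_py; infer_instance

-- ===== CLAIM (what is proved, stated in full; the proofs are below) =====
def Claim_equal_split_punc_and_symbols_py : Prop := ∀ (tokens : List String), Dom_split_punc_and_symbols_py tokens → Spec_split_punc_and_symbols_py tokens (split_punc_and_symbols_py tokens)

-- ===== LEMMAS AND PROOFS =====
-- Invariant: at position i with segment start `start`, A's accumulator `split` is the slice
-- (t.drop start).take (i - start); then both loops perform identical appends.
theorem pv_token_eq (t : List Char) (cs : List Char) (i start : Nat) (out : List String)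
    (hdrop : t.drop i = cs) (hsi : start ≤ i) (hit : i ≤ t.length) :
    pvA_token out cs ((t.drop start).take (i - start)) = pvB_go t cs i start out := by
  induction cs generalizing i start out with
  | nil =>
    have hlen : t.length ≤ i := by
      have := congrArg List.length hdrop
      simp [List.length_drop] at this
      omega
    have hfull : (t.drop start).take (i - start) = t.drop start := by
      apply List.take_of_length_le
      simp [List.length_drop]; omega
    have hl : (t.drop start).length = t.length - start := by simp
    simp only [pvA_token, pvB_go, hfull, hl]
    by_cases h : start < t.length
    · rw [if_pos (by omega), if_pos h]
    · rw [if_neg (by omega), if_neg h]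
  | cons c rest ih =>
    have hi : i < t.length := by
      by_contra h
      rw [List.drop_eq_nil_of_le (by omega)] at hdrop
      exact List.cons_ne_nil c rest hdrop.symm
    have hrest : t.drop (i + 1) = rest := by
      have : (t.drop i).drop 1 = rest := by rw [hdrop]; rfl
      rwa [List.drop_drop] at this
    have hci : t[i] = c := by
      have : (t.drop i)[0]'(by rw [hdrop]; simp) = c := by simp [hdrop]
      simpa using this
    have hsplitlen : ((t.drop start).take (i - start)).length = i - start := by
      simp [List.length_take, List.length_drop]; omega
    simp only [pvA_token, pvB_go]
    by_cases hps : pvIsPS c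
    · rw [if_pos hps, if_pos hps]
      have hcond : (0 < ((t.drop start).take (i - start)).length) ↔ (start < i) := by
        rw [hsplitlen]; omega
      have := ih (i + 1) (i + 1)
        ((if start < i then out ++ [String.ofList ((t.drop start).take (i - start))] else out) ++ [String.ofList [c]])
        hrest (le_refl _) (by omega)
      simp only [Nat.sub_self, List.take_zero] at this
      rw [← this]
      congr 1
      by_cases h : start < i
      · rw [if_pos (by omega), if_pos h]
      · rw [if_neg (by omega), if_neg h]
    · rw [if_neg hps, if_neg hps]
      have hstep : (t.drop start).take (i + 1 - start) =
          (t.drop start).take (i - start) ++ [c] := by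
        have h1 : i + 1 - start = (i - start) + 1 := by omega
        rw [h1, List.take_add_one]
        have h2 : (t.drop start)[i - start]? = some c := by
          rw [List.getElem?_drop]
          have : start + (i - start) = i := by omega
          rw [this, List.getElem?_eq_getElem hi, hci]
        simp [h2]
      rw [← hstep]
      exact ih (i + 1) start out hrest (by omega) (by omega)

theorem pv_foldl_eq (tokens : List String) (acc : List String) :
    tokens.foldl (fun acc t => pvA_token acc t.toList []) acc =
    tokens.foldl (fun out t => pvB_go t.toList t.toList 0 0 out) acc := by
  induction tokens generalizing acc with
  | nil => rfl
  | cons t rest ih =>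
    simp only [List.foldl_cons]
    rw [← ih]
    congr 1
    have := pv_token_eq t.toList t.toList 0 0 acc rfl (le_refl _) (by omega)
    simpa using this

-- ===== VERDICT (by name: the statement is the Claim_ definition above) =====
theorem split_punc_and_symbols_py_spec : Claim_equal_split_punc_and_symbols_py := by
  intro tokens _
  unfold Spec_split_punc_and_symbols_py split_punc_and_symbols_py split_punc_and_symbols_py_alt
  exact pv_foldl_eq tokens []
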